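-- pv_equiv track=rewrite | github.com/rehemasomo/phase-3-project-Job-Search-Platform | fake_job_generator.py | search_job_listings
-- ===== SOURCE A (Python) =====
-- def search_job_listings(job_listings, location=None, industry=None, job_type=None):
--     filtered_listings = []
--     for job_listing in job_listings:
--         if (not location or job_listing[1] == location) and \
--            (not industry or job_listing[2] == industry) and \
--            (not job_type or job_listing[3] == job_type):
--             filtered_listings.append(job_listing)
--     return filtered_listings
-- ===== SOURCE B (Python) =====
-- def search_job_listings(job_listings, location=None, industry=None, job_type=None):
--     # Index-set intersection: each active criterion contributes the set of row
--     # indices matching it; the answer is the rows whose index survives every set.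
--     keep = set(range(len(job_listings)))
--     for pos, value in ((1, location), (2, industry), (3, job_type)):
--         if value:
--             keep &= {i for i, row in enumerate(job_listings) if row[pos] == value}
--     return [row for i, row in enumerate(job_listings) if i in keep]
-- ===== Notes on version B (the rewrite author's own statement) =====
-- stated objective: alternative
-- what changed: Replaces A's single short-circuiting row loop by an index-set algorithm: build the set of matching row indices per active criterion, intersect these sets, then select the surviving rows by index.
import Mathlib
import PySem

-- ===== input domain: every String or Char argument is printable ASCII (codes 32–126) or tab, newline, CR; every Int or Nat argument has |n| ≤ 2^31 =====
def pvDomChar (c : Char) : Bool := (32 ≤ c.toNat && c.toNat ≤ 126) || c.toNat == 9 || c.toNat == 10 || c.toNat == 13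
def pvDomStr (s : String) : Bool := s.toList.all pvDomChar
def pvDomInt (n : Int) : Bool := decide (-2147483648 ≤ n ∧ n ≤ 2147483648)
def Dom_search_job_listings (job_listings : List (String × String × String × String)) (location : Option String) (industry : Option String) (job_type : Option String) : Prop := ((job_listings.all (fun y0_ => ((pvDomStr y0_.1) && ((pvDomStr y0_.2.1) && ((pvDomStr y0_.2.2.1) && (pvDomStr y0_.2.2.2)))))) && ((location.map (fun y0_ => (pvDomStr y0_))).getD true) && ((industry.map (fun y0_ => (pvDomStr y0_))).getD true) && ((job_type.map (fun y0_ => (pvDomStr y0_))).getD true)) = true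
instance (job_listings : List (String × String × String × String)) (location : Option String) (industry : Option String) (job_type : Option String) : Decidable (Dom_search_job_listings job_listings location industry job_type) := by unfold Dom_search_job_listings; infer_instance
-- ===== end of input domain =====

-- B replaces A's single short-circuiting row loop by an index-set algorithm:
-- per active criterion the set of matching row indices is built, the sets are
-- intersected, and the surviving rows are selected by index (objective: alternative).

-- ===== PORT A =====
-- Python truthiness of an Optional[str] in A's '(not x or row[i] == x)': None and "" are falsy.
def pvOk (o : Option String) (v : String) : Bool :=
  match o with
  | none => true
  | some s => if s == "" then true else v == s

def search_job_listings (job_listings : List (String × String × String × String)) (location : Option String) (industry : Option String) (job_type : Option String) : List (String × String × String × String) :=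
  job_listings.foldl (fun acc j =>
    if pvOk location j.2.1 && pvOk industry j.2.2.1 && pvOk job_type j.2.2.2
    then acc ++ [j] else acc) []

-- ===== PORT B =====
-- {i for i, row in enumerate(job_listings) if row[pos] == value}
def pvMatchIdx (jl : List (String × String × String × String))
    (get : (String × String × String × String) → String) (v : String) : PySem.Set Int :=
  PySem.Set.ofList (((PySem.List.enumerate jl).filter (fun p => get p.2 == v)).map (·.1))

-- one iteration of B's loop over ((1, location), (2, industry), (3, job_type)):
-- 'if value: keep &= {…}' (Python truthiness: None and "" are falsy)
def pvStep (jl : List (String × String × String × String)) (keep : PySem.Set Int)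
    (o : Option String) (get : (String × String × String × String) → String) : PySem.Set Int :=
  match o with
  | none => keep
  | some s => if s == "" then keep else PySem.Set.inter keep (pvMatchIdx jl get s)

def search_job_listings_alt (job_listings : List (String × String × String × String)) (location : Option String) (industry : Option String) (job_type : Option String) : List (String × String × String × String) :=
  let keep := PySem.Set.ofList (PySem.List.pyRange 0 job_listings.length 1)
  let keep := pvStep job_listings keep location (fun r => r.2.1)
  let keep := pvStep job_listings keep industry (fun r => r.2.2.1)
  let keep := pvStep job_listings keep job_type (fun r => r.2.2.2)
  ((PySem.List.enumerate job_listings).filter (fun p => PySem.Set.contains keep p.1)).map (·.2)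

-- ===== PRECONDITION & SPEC =====
def Spec_search_job_listings (job_listings : List (String × String × String × String)) (location : Option String) (industry : Option String) (job_type : Option String) (out : List (String × String × String × String)) : Prop := out = search_job_listings_alt job_listings location industry job_type
instance (job_listings : List (String × String × String × String)) (location : Option String) (industry : Option String) (job_type : Option String) (out : List (String × String × String × String)) : Decidable (Spec_search_job_listings job_listings location industry job_type out) := by unfold Spec_search_job_listings; infer_instance

-- ===== CLAIM (what is proved, stated in full; the proofs are below) =====
def Claim_equal_search_job_listings : Prop := ∀ (job_listings : List (String × String × String × String)) (location : Option String) (industry : Option String) (job_type : Option String), Dom_search_job_listings job_listings location industry job_type → Spec_search_job_listings job_listings location industry job_type (search_job_listings job_listings location industry job_type)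

-- ===== LEMMAS AND PROOFS =====

-- membership in one criterion's index set
theorem mem_pvMatchIdx (jl : List (String × String × String × String)) (get v) (k : Nat) (hk : k < jl.length) :
    ((k : Int) ∈ pvMatchIdx jl get v) ↔ (get jl[k] == v) = true := by
  unfold pvMatchIdx
  rw [PySem.Set.mem_ofList]
  simp only [List.mem_map, List.mem_filter, PySem.List.mem_enumerate_iff]
  constructor
  · rintro ⟨p, ⟨⟨j, hj, rfl⟩, hmatch⟩, hfst⟩
    simp only [zero_add] at hfst hmatch ⊢
    have : j = k := by exact_mod_cast hfst
    subst this; exact hmatch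
  · intro h
    exact ⟨((k : Int), jl[k]), ⟨⟨k, hk, by simp⟩, h⟩, rfl⟩

-- membership through one pass of B's loop
theorem mem_pvStep (jl : List (String × String × String × String)) (keep : PySem.Set Int)
    (o : Option String) (get) (k : Nat) (hk : k < jl.length) :
    ((k : Int) ∈ pvStep jl keep o get) ↔ ((k : Int) ∈ keep ∧ pvOk o (get jl[k]) = true) := by
  cases o with
  | none => simp [pvStep, pvOk]
  | some s =>
    by_cases hs : s = ""
    · simp [pvStep, pvOk, hs]
    · simp only [pvStep, pvOk]
      rw [if_neg (by simpa using hs), if_neg (by simpa using hs),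
        PySem.Set.mem_inter, mem_pvMatchIdx jl get s k hk]

-- selecting rows whose index satisfies c is a filter, when c agrees with q pointwise
theorem filter_enumerate_map (jl : List (String × String × String × String)) (s : Int)
    (c : Int → Bool) (q : (String × String × String × String) → Bool)
    (h : ∀ (k : Nat) (hk : k < jl.length), c (s + k) = q jl[k]) :
    ((PySem.List.enumerate jl s).filter (fun p => c p.1)).map (·.2) = jl.filter q := by
  induction jl generalizing s with
  | nil => simp [PySem.List.enumerate_nil]
  | cons x xs ih =>
    rw [PySem.List.enumerate_cons]
    have h0 : c s = q x := by simpa using h 0 (by simp)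
    have hrest := ih (s + 1) (fun k hk => by
      have := h (k + 1) (by simpa using Nat.succ_lt_succ hk)
      simpa [add_assoc, add_comm, add_left_comm] using this)
    simp only [List.filter_cons]
    rw [h0]
    by_cases hq : q x = true
    · simp [hq, hrest]
    · simp only [Bool.not_eq_true] at hq; simp [hq, hrest]

-- ===== VERDICT (by name: the statement is the Claim_ definition above) =====
theorem search_job_listings_spec : Claim_equal_search_job_listings := by
  intro jl loc ind jt _
  show _ = _
  unfold search_job_listings search_job_listings_alt
  rw [PySem.List.foldl_append_if_eq_filter]
  refine (filter_enumerate_map jl 0 _ _ ?_).symm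
  intro k hk
  rw [Bool.eq_iff_iff, PySem.Set.contains_iff]
  simp only [zero_add]
  rw [mem_pvStep jl _ jt _ k hk, mem_pvStep jl _ ind _ k hk, mem_pvStep jl _ loc _ k hk,
    PySem.Set.mem_ofList, PySem.List.mem_pyRange_one]
  simp only [Bool.and_eq_true]
  constructor
  · rintro ⟨⟨⟨_, h1⟩, h2⟩, h3⟩
    exact ⟨⟨h1, h2⟩, h3⟩
  · rintro ⟨⟨h1, h2⟩, h3⟩
    exact ⟨⟨⟨⟨Int.natCast_nonneg k, by exact_mod_cast hk⟩, h1⟩, h2⟩, h3⟩
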